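-- pv_equiv track=rewrite | github.com/ElProfeRodo/ejercicios | 4. Funciones/7/Daniel.Castro.py | nombre_mascota_valido
-- ===== SOURCE A (Python) =====
-- def nombre_mascota_valido(nombre):
--     contador = 0
--     for letra in nombre:
--         contador = contador + 1
--     if contador > 6:
--         return True
--     else:
--         return False
-- ===== SOURCE B (Python) =====
-- def nombre_mascota_valido(nombre):
--     return len(nombre) > 6
-- ===== Notes on version B (the rewrite author's own statement) =====
-- stated objective: idiomatic
-- what changed: Replaced the manual character-counting loop with a single closed-form comparison len(nombre) > 6.
import Mathlib
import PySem

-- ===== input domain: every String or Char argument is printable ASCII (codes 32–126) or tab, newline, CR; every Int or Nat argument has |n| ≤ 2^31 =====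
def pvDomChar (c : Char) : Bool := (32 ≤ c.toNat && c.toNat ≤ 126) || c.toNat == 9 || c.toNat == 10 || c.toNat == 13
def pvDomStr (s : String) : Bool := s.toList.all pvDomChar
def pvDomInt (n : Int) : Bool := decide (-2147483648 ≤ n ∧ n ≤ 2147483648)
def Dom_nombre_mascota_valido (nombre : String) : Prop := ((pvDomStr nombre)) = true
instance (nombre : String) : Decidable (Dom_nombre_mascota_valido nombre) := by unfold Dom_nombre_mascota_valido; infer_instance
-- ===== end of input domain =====

-- B replaces A's manual character-counting loop by the closed-form length comparison (idiomatic).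


-- ===== PORT A =====
def nombre_mascota_valido (nombre : String) : Bool :=
  let contador : Int := nombre.toList.foldl (fun contador _letra => contador + 1) 0
  if contador > 6 then true else false

-- ===== PORT B =====
def nombre_mascota_valido_alt (nombre : String) : Bool :=
  PySem.Str.len nombre > 6

-- ===== PRECONDITION & SPEC =====
def Spec_nombre_mascota_valido (nombre : String) (out : Bool) : Prop := out = nombre_mascota_valido_alt nombre
instance (nombre : String) (out : Bool) : Decidable (Spec_nombre_mascota_valido nombre out) := by unfold Spec_nombre_mascota_valido; infer_instance

-- ===== CLAIM (what is proved, stated in full; the proofs are below) =====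
def Claim_equal_nombre_mascota_valido : Prop := ∀ (nombre : String), Dom_nombre_mascota_valido nombre → Spec_nombre_mascota_valido nombre (nombre_mascota_valido nombre)

-- ===== LEMMAS AND PROOFS =====
theorem pv_count_eq (l : List Char) (c : Int) :
    l.foldl (fun contador _ => contador + 1) c = c + l.length := by
  induction l generalizing c with
  | nil => simp
  | cons h t ih => simp [List.foldl, ih]; omega

-- ===== VERDICT (by name: the statement is the Claim_ definition above) =====
theorem nombre_mascota_valido_spec : Claim_equal_nombre_mascota_valido := by
  intro nombre _
  unfold Spec_nombre_mascota_valido nombre_mascota_valido nombre_mascota_valido_alt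
  simp [pv_count_eq, PySem.Str.len_eq]
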